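-- pv_equiv track=rewrite | github.com/rushabh2003/CP-Practicals | Hartals/hartals.py | count_hartals
-- ===== SOURCE A (Python) =====
-- def count_hartals(N, hartal_gaps):
--     hartals = 0
--     for day in range(1, N + 1):
--         if day % 7 == 6 or day % 7 == 0:
--             continue
--         for h in hartal_gaps:
--             if day % h == 0:
--                 hartals += 1
--                 break
--     return hartals
-- ===== SOURCE B (Python) =====
-- def count_hartals(N, hartal_gaps):
--     n = max(N, 0)
--     marked = bytearray(n + 1)
--     for h in hartal_gaps:
--         step = abs(h)
--         for d in range(step, n + 1, step):
--             marked[d] = 1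
--     return sum(1 for d in range(1, n + 1) if marked[d] and d % 7 != 6 and d % 7 != 0)
-- ===== Notes on version B (the rewrite author's own statement) =====
-- stated objective: faster
-- what changed: Replaces the per-day scan over all gaps (O(N*K)) by a sieve: for each gap mark its multiples up to N in a set, then count the marked non-weekend days.
-- outside the precondition, e.g. on count_hartals(6, [1, 0]): A returns 5, B raises ValueError
import Mathlib
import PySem

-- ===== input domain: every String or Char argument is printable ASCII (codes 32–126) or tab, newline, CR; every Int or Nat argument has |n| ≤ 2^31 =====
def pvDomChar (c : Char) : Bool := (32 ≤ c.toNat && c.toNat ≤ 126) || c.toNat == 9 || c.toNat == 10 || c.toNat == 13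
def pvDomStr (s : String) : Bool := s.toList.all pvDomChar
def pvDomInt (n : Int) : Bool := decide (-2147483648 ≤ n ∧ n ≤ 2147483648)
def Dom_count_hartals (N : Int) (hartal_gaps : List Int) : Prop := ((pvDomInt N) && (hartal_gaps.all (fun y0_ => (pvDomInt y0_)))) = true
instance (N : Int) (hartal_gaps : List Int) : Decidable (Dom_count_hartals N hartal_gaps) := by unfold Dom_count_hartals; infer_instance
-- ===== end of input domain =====

-- B replaces A's per-day scan over all gaps by a sieve that marks each gap's multiples once (faster).

-- ===== PORT A =====
-- inner 'for h in hartal_gaps: if day % h == 0: hartals += 1; break' as the increment it contributes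
def countHartalsInner (day : Int) : List Int → Int
  | [] => 0
  | h :: rest => if PySem.Int.mod day h = 0 then 1 else countHartalsInner day rest

def count_hartals (N : Int) (hartal_gaps : List Int) : Int :=
  (PySem.List.pyRange 1 (N + 1) 1).foldl
    (fun hartals day =>
      if PySem.Int.mod day 7 = 6 ∨ PySem.Int.mod day 7 = 0 then hartals
      else hartals + countHartalsInner day hartal_gaps) 0

-- ===== PORT B =====
def count_hartals_alt (N : Int) (hartal_gaps : List Int) : Int :=
  let n := max N 0
  -- bytearray sieve; every written/read index is nonnegative, so .toNat indexing is exact here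
  let marked : Array Bool :=
    hartal_gaps.foldl (fun m h =>
      (PySem.List.pyRange |h| (n + 1) |h|).foldl (fun m d => m.setIfInBounds d.toNat true) m)
      (Array.replicate (n + 1).toNat false)
  (PySem.List.pyRange 1 (n + 1) 1).foldl
    (fun acc d =>
      if marked.getD d.toNat false ∧ PySem.Int.mod d 7 ≠ 6 ∧ PySem.Int.mod d 7 ≠ 0 then acc + 1
      else acc) 0

-- ===== PRECONDITION & SPEC =====
-- Pre_ excludes gap lists containing 0: there A raises ZeroDivisionError as soon as some
-- non-weekend day is not divisible by a gap preceding the 0, and B always raises ValueError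
-- (range step 0), so on the few 0-containing inputs where A still returns no agreement is possible.
def Pre_count_hartals (N : Int) (hartal_gaps : List Int) : Prop := (0 : Int) ∉ hartal_gaps
instance (N : Int) (hartal_gaps : List Int) : Decidable (Pre_count_hartals N hartal_gaps) := by unfold Pre_count_hartals; infer_instance

def pvWitness_count_hartals : Int × List Int := (20, [3, -5])

def Spec_count_hartals (N : Int) (hartal_gaps : List Int) (out : Int) : Prop := out = count_hartals_alt N hartal_gaps
instance (N : Int) (hartal_gaps : List Int) (out : Int) : Decidable (Spec_count_hartals N hartal_gaps out) := by unfold Spec_count_hartals; infer_instance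

-- ===== CLAIM (what is proved, stated in full; the proofs are below) =====
def Claim_equal_count_hartals : Prop := ∀ (N : Int) (hartal_gaps : List Int), Dom_count_hartals N hartal_gaps → Pre_count_hartals N hartal_gaps → Spec_count_hartals N hartal_gaps (count_hartals N hartal_gaps)

-- ===== LEMMAS AND PROOFS =====

-- the day predicate A counts: non-weekend and divisible by some gap
def pvHit (gaps : List Int) (d : Int) : Bool :=
  (!(PySem.Int.mod d 7 = 6 ∨ PySem.Int.mod d 7 = 0) : Bool) && gaps.any (fun h => decide (h ∣ d))

theorem countHartalsInner_eq (day : Int) (gaps : List Int) :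
    countHartalsInner day gaps = if gaps.any (fun h => decide (h ∣ day)) then 1 else 0 := by
  induction gaps with
  | nil => rfl
  | cons h rest ih =>
    simp only [countHartalsInner, List.any_cons, PySem.Int.mod_eq_zero_iff_dvd, ih]
    by_cases hd : h ∣ day <;> simp [hd]

theorem count_hartals_foldl (gaps : List Int) (l : List Int) (acc : Int) :
    l.foldl (fun hartals day =>
      if PySem.Int.mod day 7 = 6 ∨ PySem.Int.mod day 7 = 0 then hartals
      else hartals + countHartalsInner day gaps) acc = acc + (l.countP (pvHit gaps) : Int) := by
  induction l generalizing acc with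
  | nil => simp
  | cons d rest ih =>
    rw [List.foldl_cons]
    by_cases hw : PySem.Int.mod d 7 = 6 ∨ PySem.Int.mod d 7 = 0
    · rw [if_pos hw, ih, List.countP_cons]
      have hph : pvHit gaps d = false := by
        simp only [pvHit, decide_eq_true hw, Bool.not_true, Bool.false_and]
      simp [hph]
    · rw [if_neg hw, countHartalsInner_eq, ih, List.countP_cons]
      by_cases hh : gaps.any (fun h => decide (h ∣ d)) = true
      · have hph : pvHit gaps d = true := by
          simp only [pvHit, hh, Bool.and_true, Bool.not_eq_true', decide_eq_false_iff_not]
          exact hw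
        rw [if_pos hh, hph, if_pos rfl]
        push_cast
        ring
      · have hph : pvHit gaps d = false := by
          simp only [pvHit, eq_false_of_ne_true hh, Bool.and_false]
        rw [if_neg hh, hph]
        simp

theorem sieve_inner_size (l : List Int) (m : Array Bool) :
    (l.foldl (fun m d => m.setIfInBounds d.toNat true) m).size = m.size := by
  induction l generalizing m with
  | nil => rfl
  | cons d rest ih => rw [List.foldl_cons, ih, Array.size_setIfInBounds]

theorem sieve_inner_get? (l : List Int) (m : Array Bool) (i : Nat) :
    (l.foldl (fun m d => m.setIfInBounds d.toNat true) m)[i]? =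
      if ∃ d ∈ l, d.toNat = i ∧ i < m.size then some true else m[i]? := by
  induction l generalizing m with
  | nil => simp
  | cons d rest ih =>
    rw [List.foldl_cons, ih, Array.size_setIfInBounds]
    by_cases hrest : ∃ e ∈ rest, e.toNat = i ∧ i < m.size
    · rw [if_pos hrest, if_pos (by obtain ⟨e, he, h⟩ := hrest; exact ⟨e, List.mem_cons_of_mem _ he, h⟩)]
    · rw [if_neg hrest, Array.getElem?_setIfInBounds]
      by_cases hd : d.toNat = i
      · by_cases hsz : i < m.size
        · rw [if_pos hd, if_pos (hd ▸ hsz), if_pos ⟨d, List.mem_cons_self, hd, hsz⟩]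
        · rw [if_pos hd, if_neg (hd ▸ hsz),
            if_neg (by rintro ⟨e, _, _, h⟩; exact hsz h),
            Array.getElem?_eq_none (by omega)]
      · rw [if_neg hd,
          if_neg (by rintro ⟨e, he, hei, hisz⟩
                     rcases List.mem_cons.mp he with rfl | he'
                     · exact hd hei
                     · exact hrest ⟨e, he', hei, hisz⟩)]

theorem marked_getD (gaps : List Int) (n : Int) (s : Array Bool) (i : Nat) :
    (gaps.foldl (fun m h =>
        (PySem.List.pyRange |h| (n + 1) |h|).foldl (fun m d => m.setIfInBounds d.toNat true) m)
        s)[i]?.getD false = true ↔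
      (∃ h ∈ gaps, ∃ d ∈ PySem.List.pyRange |h| (n + 1) |h|, d.toNat = i ∧ i < s.size) ∨
        s[i]?.getD false = true := by
  induction gaps generalizing s with
  | nil => simp
  | cons g rest ih =>
    rw [List.foldl_cons, ih, sieve_inner_size, sieve_inner_get?]
    by_cases hg : ∃ d ∈ PySem.List.pyRange |g| (n + 1) |g|, d.toNat = i ∧ i < s.size
    · rw [if_pos hg]
      simp only [Option.getD_some]
      exact ⟨fun _ => Or.inl ⟨g, List.mem_cons_self, hg⟩, fun _ => Or.inr trivial⟩
    · rw [if_neg hg]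
      constructor
      · rintro (⟨h, hm, hd⟩ | hs)
        · exact Or.inl ⟨h, List.mem_cons_of_mem _ hm, hd⟩
        · exact Or.inr hs
      · rintro (⟨h, hm, hd⟩ | hs)
        · rcases List.mem_cons.mp hm with rfl | hm'
          · exact absurd hd hg
          · exact Or.inl ⟨h, hm', hd⟩
        · exact Or.inr hs

-- for d in [1, n]: hit by some gap ↔ d lies in some gap's sieve range
theorem hit_iff_marked (gaps : List Int) (h0 : (0 : Int) ∉ gaps) (n d : Int)
    (h1 : 1 ≤ d) (h2 : d ≤ n) :
    (gaps.any (fun h => decide (h ∣ d)) = true) ↔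
      ∃ h ∈ gaps, d ∈ PySem.List.pyRange |h| (n + 1) |h| := by
  simp only [List.any_eq_true, decide_eq_true_eq]
  constructor
  · rintro ⟨h, hm, hdvd⟩
    have hpos : 0 < |h| := abs_pos.mpr (fun he => h0 (he ▸ hm))
    refine ⟨h, hm, (PySem.List.mem_pyRange_iff_of_pos hpos d).mpr ?_⟩
    have habs : |h| ∣ d := (abs_dvd h d).mpr hdvd
    exact ⟨Int.le_of_dvd (by omega) habs, by omega, dvd_sub habs dvd_rfl⟩
  · rintro ⟨h, hm, hr⟩
    have hpos : 0 < |h| := abs_pos.mpr (fun he => h0 (he ▸ hm))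
    obtain ⟨-, -, hdvd⟩ := (PySem.List.mem_pyRange_iff_of_pos hpos d).mp hr
    have habs : |h| ∣ d := by
      have := dvd_add hdvd (dvd_refl |h|); simpa using this
    exact ⟨h, hm, (abs_dvd h d).mp habs⟩

theorem pyRange_shift (N : Int) : PySem.List.pyRange 1 (N + 1) 1 = PySem.List.pyRange 1 (max N 0 + 1) 1 := by
  rcases le_or_gt N 0 with hle | hlt
  · rw [max_eq_right hle, PySem.List.pyRange_one_eq_nil (by omega), PySem.List.pyRange_one_eq_nil (by omega)]
  · rw [max_eq_left (by omega)]

theorem count_hartals_spec_aux (N : Int) (gaps : List Int) (h0 : (0 : Int) ∉ gaps) :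
    count_hartals N gaps = count_hartals_alt N gaps := by
  unfold count_hartals count_hartals_alt
  set n := max N 0 with hn
  have hn0 : (0 : Int) ≤ n := le_max_right N 0
  set marked := gaps.foldl (fun m h =>
      (PySem.List.pyRange |h| (n + 1) |h|).foldl (fun m d => m.setIfInBounds d.toNat true) m)
      (Array.replicate (n + 1).toNat false) with hmarked
  rw [pyRange_shift, ← hn, count_hartals_foldl,
    PySem.List.foldl_ite_add_one
      (fun d => marked.getD d.toNat false = true ∧ PySem.Int.mod d 7 ≠ 6 ∧ PySem.Int.mod d 7 ≠ 0)
      (PySem.List.pyRange 1 (n + 1) 1) 0, zero_add, zero_add]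
  congr 1
  apply List.countP_congr
  intro d hd
  obtain ⟨hd1, hd2⟩ := PySem.List.mem_pyRange_one.mp hd
  have hszn : d.toNat < (n + 1).toNat := by omega
  have hsz : d.toNat < (Array.replicate (n + 1).toNat false).size := by
    rw [Array.size_replicate]; exact hszn
  have hget : marked.getD d.toNat false = true ↔
      ∃ h ∈ gaps, d ∈ PySem.List.pyRange |h| (n + 1) |h| := by
    rw [Array.getD_eq_getD_getElem?, hmarked, marked_getD, Array.getElem?_replicate,
      if_pos hszn]
    simp only [Option.getD_some, Bool.false_eq_true, or_false]
    constructor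
    · rintro ⟨h, hm, e, he, hei, -⟩
      have hpos : 0 < |h| := abs_pos.mpr (fun hz => h0 (hz ▸ hm))
      obtain ⟨hge, -, -⟩ := (PySem.List.mem_pyRange_iff_of_pos hpos e).mp he
      have heq : e = d := by omega
      exact ⟨h, hm, heq ▸ he⟩
    · rintro ⟨h, hm, hdm⟩
      exact ⟨h, hm, d, hdm, rfl, hsz⟩
  have hhit := hit_iff_marked gaps h0 n d hd1 (by omega)
  simp only [pvHit, Bool.and_eq_true, Bool.not_eq_true', decide_eq_false_iff_not,
    decide_eq_true_eq]
  constructor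
  · rintro ⟨hnw, hany⟩
    exact ⟨hget.mpr (hhit.mp hany), by tauto⟩
  · rintro ⟨hm, hnw1, hnw2⟩
    exact ⟨by tauto, hhit.mpr (hget.mp hm)⟩

-- ===== VERDICT (by name: the statement is the Claim_ definition above) =====
theorem count_hartals_spec : Claim_equal_count_hartals := by
  intro N gaps _ hpre
  exact count_hartals_spec_aux N gaps hpre
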